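-- pv_equiv track=rewrite | github.com/A-Evan-S/Advent-Of-Code-2020 | Day_24/day24.py | create_tiles
-- ===== SOURCE A (Python) =====
-- from collections import defaultdict
--
-- def parse_line(line):
--     directions = []
--     while len(line) > 0:
--         if line.startswith('e') or line.startswith('w'):
--             directions.append(line[0])
--             line = line[1:]
--         else:
--             directions.append(line[0:2])
--             line = line[2:]
--     return directions
--
-- def create_tiles(input):
--     tiles = defaultdict(lambda: False)
--     for line in input:
--         row, col = 0, 0
--         for direction in parse_line(line):
--             if direction == 'e':
--                 col += 1
--             elif direction == 'w':
--                 col -= 1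
--             elif direction == 'ne':
--                 col += row % 2
--                 row -= 1
--             elif direction == 'nw':
--                 row -= 1
--                 col -= row % 2
--             elif direction == 'se':
--                 col += row % 2
--                 row += 1
--             elif direction == 'sw':
--                 row += 1
--                 col -= row % 2
--         tiles[row, col] = not tiles[row, col]
--     return tiles
-- ===== SOURCE B (Python) =====
-- from collections import defaultdict, Counter
--
-- def _endpoint(line):
--     row, col = 0, 0
--     i, n = 0, len(line)
--     while i < n:
--         ch = line[i]
--         if ch == 'e':
--             col += 1
--             i += 1
--         elif ch == 'w':
--             col -= 1
--             i += 1
--         else: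
--             d = line[i:i + 2]
--             if d == 'ne':
--                 col += row % 2
--                 row -= 1
--             elif d == 'nw':
--                 row -= 1
--                 col -= row % 2
--             elif d == 'se':
--                 col += row % 2
--                 row += 1
--             elif d == 'sw':
--                 row += 1
--                 col -= row % 2
--             i += 2
--     return row, col
--
-- def create_tiles(input):
--     counts = Counter(_endpoint(line) for line in input)
--     tiles = defaultdict(lambda: False)
--     for pos, c in counts.items():
--         tiles[pos] = (c % 2 == 1)
--     return tiles
-- ===== Notes on version B (the rewrite author's own statement) =====
-- stated objective: simpler
-- what changed: B replaces A's token-list parse plus per-line dict-toggle with a single char-indexed walk per line feeding a Counter of endpoints, followed by one parity pass that builds the result dict.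
import Mathlib
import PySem

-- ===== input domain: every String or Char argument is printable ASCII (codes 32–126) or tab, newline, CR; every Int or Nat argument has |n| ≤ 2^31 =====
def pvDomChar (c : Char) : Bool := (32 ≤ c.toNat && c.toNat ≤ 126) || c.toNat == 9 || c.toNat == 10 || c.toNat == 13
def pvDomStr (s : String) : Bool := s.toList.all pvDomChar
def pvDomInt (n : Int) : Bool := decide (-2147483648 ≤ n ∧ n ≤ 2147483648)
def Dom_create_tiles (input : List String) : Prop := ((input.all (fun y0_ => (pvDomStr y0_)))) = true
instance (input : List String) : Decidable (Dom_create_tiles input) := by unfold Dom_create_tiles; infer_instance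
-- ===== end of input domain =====

-- B builds a Counter of line endpoints in one pass and derives the tile dict by a parity pass; same return value, simpler shape.
-- (A and B both return a defaultdict; equivalence is about its items in insertion order, flattened to (row, col, bool).)

-- ===== PORT A =====
-- parse_line: token list, one char for e/w, else two chars
def pvParseLine : List Char → List String
  | [] => []
  | c1 :: rest =>
    if c1 = 'e' ∨ c1 = 'w' then String.ofList [c1] :: pvParseLine rest
    else match rest with
      | [] => [String.ofList [c1]]
      | c2 :: rest2 => String.ofList [c1, c2] :: pvParseLine rest2

-- the if/elif chain of A's inner loop
def pvStep (rc : Int × Int) (dir : String) : Int × Int :=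
  if dir = "e" then (rc.1, rc.2 + 1)
  else if dir = "w" then (rc.1, rc.2 - 1)
  else if dir = "ne" then (rc.1 - 1, rc.2 + PySem.Int.mod rc.1 2)
  else if dir = "nw" then (rc.1 - 1, rc.2 - PySem.Int.mod (rc.1 - 1) 2)
  else if dir = "se" then (rc.1 + 1, rc.2 + PySem.Int.mod rc.1 2)
  else if dir = "sw" then (rc.1 + 1, rc.2 - PySem.Int.mod (rc.1 + 1) 2)
  else rc

def create_tiles (input : List String) : List (Int × Int × Bool) :=
  let tiles : PySem.Dict (Int × Int) Bool :=
    input.foldl (fun d line =>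
      let rc := (pvParseLine line.toList).foldl pvStep (0, 0)
      d.insert rc (! d.getD rc false)) PySem.Dict.empty
  tiles.items.map (fun p => (p.1.1, p.1.2, p.2))

-- ===== PORT B =====
-- one char-indexed walk per line, no token list
def pvEndpoint : List Char → Int → Int → Int × Int
  | [], r, c => (r, c)
  | ch :: rest, r, c =>
    if ch = 'e' then pvEndpoint rest r (c + 1)
    else if ch = 'w' then pvEndpoint rest r (c - 1)
    else match rest with
      | [] => (r, c)
      | ch2 :: rest2 =>
        if String.ofList [ch, ch2] = "ne" then pvEndpoint rest2 (r - 1) (c + PySem.Int.mod r 2)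
        else if String.ofList [ch, ch2] = "nw" then pvEndpoint rest2 (r - 1) (c - PySem.Int.mod (r - 1) 2)
        else if String.ofList [ch, ch2] = "se" then pvEndpoint rest2 (r + 1) (c + PySem.Int.mod r 2)
        else if String.ofList [ch, ch2] = "sw" then pvEndpoint rest2 (r + 1) (c - PySem.Int.mod (r + 1) 2)
        else pvEndpoint rest2 r c

def create_tiles_alt (input : List String) : List (Int × Int × Bool) :=
  let counts : PySem.Dict (Int × Int) Int :=
    input.foldl (fun d line =>
      let k := pvEndpoint line.toList 0 0
      d.insert k (d.getD k 0 + 1)) PySem.Dict.empty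
  counts.items.map (fun p => (p.1.1, p.1.2, PySem.Int.mod p.2 2 == 1))

-- ===== PRECONDITION & SPEC =====
def Spec_create_tiles (input : List String) (out : List (Int × Int × Bool)) : Prop := out = create_tiles_alt input
instance (input : List String) (out : List (Int × Int × Bool)) : Decidable (Spec_create_tiles input out) := by unfold Spec_create_tiles; infer_instance

-- ===== CLAIM (what is proved, stated in full; the proofs are below) =====
def Claim_equal_create_tiles : Prop := ∀ (input : List String), Dom_create_tiles input → Spec_create_tiles input (create_tiles input)

-- ===== LEMMAS AND PROOFS =====

lemma pvParseLine_nil : pvParseLine [] = [] := rfl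
lemma pvParseLine_cons (c1 : Char) (rest : List Char) :
    pvParseLine (c1 :: rest)
      = if c1 = 'e' ∨ c1 = 'w' then String.ofList [c1] :: pvParseLine rest
        else match rest with
          | [] => [String.ofList [c1]]
          | c2 :: rest2 => String.ofList [c1, c2] :: pvParseLine rest2 := by
  cases rest
  · rfl
  · rfl

lemma endpoint_eq_foldl (l : List Char) (r c : Int) :
    pvEndpoint l r c = (pvParseLine l).foldl pvStep (r, c) := by
  fun_induction pvEndpoint l r c <;>
    (simp_all [pvParseLine_nil, pvParseLine_cons, pvStep, String.ext_iff];
     try (split_ifs <;> simp_all))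

lemma getD_foldl_flip (l : List (Int × Int)) (d : PySem.Dict (Int × Int) Bool) (v : Int × Int) :
    (l.foldl (fun d k => d.insert k (! d.getD k false)) d).getD v false
      = xor (d.getD v false) (decide (l.count v % 2 = 1)) := by
  induction l generalizing d with
  | nil => simp
  | cons x l ih =>
    have hpar : ∀ n : Nat, decide ((n + 1) % 2 = 1) = !decide (n % 2 = 1) := by
      intro n; by_cases hn : n % 2 = 1
      · simp [hn]; omega
      · simp [hn]; omega
    simp only [List.foldl_cons, ih, PySem.Dict.getD_insert, List.count_cons]
    by_cases h : v = x
    · subst h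
      cases hb : d.getD v false
      · simp [hpar]
      · simp [hpar]
    · simp [h, Ne.symm h]

lemma parity_cast (c : Nat) : decide (c % 2 = 1) = (PySem.Int.mod (c : Int) 2 == 1) := by
  have h := PySem.Int.mod_natCast c 2
  rw [show ((2:Nat):Int) = (2:Int) by norm_num] at h
  rw [h]
  by_cases hc : c % 2 = 1
  · simp [hc]
  · simp [hc]; omega

lemma create_tiles_eq (input : List String) : create_tiles input = create_tiles_alt input := by
  have hA : create_tiles input = ((input.map (fun l => pvEndpoint l.toList 0 0)).foldl
      (fun d k => d.insert k (!d.getD k false)) PySem.Dict.empty).items.map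
        (fun p => (p.1.1, p.1.2, p.2)) := by
    simp [create_tiles, List.foldl_map, endpoint_eq_foldl]
  have hB : create_tiles_alt input
      = (PySem.Dict.counter (input.map (fun l => pvEndpoint l.toList 0 0))).items.map
          (fun p => (p.1.1, p.1.2, PySem.Int.mod p.2 2 == 1)) := by
    simp [create_tiles_alt, List.foldl_map, ← PySem.Dict.foldl_insert_getD_add_one_eq_counter]
  set ends := input.map (fun l => pvEndpoint l.toList 0 0) with hends
  set dA := ends.foldl (fun d k => d.insert k (!d.getD k false)) PySem.Dict.empty with hdA
  have hnd : dA.keys.Nodup := by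
    rw [hdA]; exact PySem.Dict.nodup_keys_foldl_insert _ _ _ (by simp)
  have hkeys : dA.keys = PySem.Set.ofList ends := by
    rw [hdA, PySem.Dict.keys_foldl_insert]
    simp [PySem.Set.update_nil_left]
  rw [hA, hB, PySem.Dict.items_counter, PySem.Dict.items_eq_map_keys dA hnd false, hkeys,
    List.map_map, List.map_map]
  refine List.map_congr_left ?_
  intro k _
  simp only [Function.comp]
  rw [hdA, getD_foldl_flip]
  simp [parity_cast]

-- ===== VERDICT (by name: the statement is the Claim_ definition above) =====
theorem create_tiles_spec : Claim_equal_create_tiles := by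
  intro input _
  unfold Spec_create_tiles
  exact create_tiles_eq input
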